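-- pv_equiv track=rewrite | github.com/rcalef/magneton | magneton/embedders/esm_embedder.py | _get_chunk_idxs
-- ===== SOURCE A (Python) =====
-- from typing import List, Optional
--
-- def _get_chunk_idxs(seq_len: int, max_len: int) -> List[tuple]:
--     """Get indices for chunking long sequences"""
--     num_pieces = (seq_len + max_len - 1) // max_len
--     lo_size = seq_len // num_pieces
--     hi_size = lo_size + 1
--     num_hi = seq_len % num_pieces
--
--     chunk_lens = [hi_size] * num_hi + [lo_size] * (num_pieces - num_hi)
--
--     chunk_idxs = []
--     curr = 0
--     for chunk_len in chunk_lens: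
--         chunk_idxs.append((curr, curr + chunk_len))
--         curr += chunk_len
--     return chunk_idxs
-- ===== SOURCE B (Python) =====
-- def _get_chunk_idxs(seq_len: int, max_len: int):
--     """Get indices for chunking long sequences (closed-form boundaries)."""
--     num_pieces = (seq_len + max_len - 1) // max_len
--     lo_size = seq_len // num_pieces
--     num_hi = seq_len % num_pieces
--     return [
--         (i * lo_size + min(i, num_hi), (i + 1) * lo_size + min(i + 1, num_hi))
--         for i in range(num_pieces)
--     ]
-- ===== Notes on version B (the rewrite author's own statement) =====
-- stated objective: simpler
-- what changed: Replaced the materialised chunk-length list and the running-offset accumulator loop by a single comprehension computing each boundary with the closed form start = i*lo_size + min(i, num_hi).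
import Mathlib
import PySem

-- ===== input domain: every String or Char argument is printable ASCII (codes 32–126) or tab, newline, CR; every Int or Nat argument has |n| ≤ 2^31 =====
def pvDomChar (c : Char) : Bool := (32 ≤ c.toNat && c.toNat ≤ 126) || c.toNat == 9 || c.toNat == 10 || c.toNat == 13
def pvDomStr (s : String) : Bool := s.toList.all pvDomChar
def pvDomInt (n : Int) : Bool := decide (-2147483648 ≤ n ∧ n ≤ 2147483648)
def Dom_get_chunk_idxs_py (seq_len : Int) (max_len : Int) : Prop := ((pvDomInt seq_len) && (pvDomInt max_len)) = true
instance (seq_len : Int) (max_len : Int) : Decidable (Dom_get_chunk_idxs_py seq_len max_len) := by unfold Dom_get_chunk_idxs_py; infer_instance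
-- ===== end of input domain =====

-- B replaces A's chunk-length list and running-offset accumulator by a closed-form boundary
-- per index (simpler decomposition, same cost); equal return value wherever A returns.

-- ===== PORT A =====
def get_chunk_idxs_py (seq_len : Int) (max_len : Int) : List (Int × Int) :=
  let num_pieces := PySem.Int.floordiv (seq_len + max_len - 1) max_len
  let lo_size := PySem.Int.floordiv seq_len num_pieces
  let hi_size := lo_size + 1
  let num_hi := PySem.Int.mod seq_len num_pieces
  let chunk_lens := PySem.List.pyRepeat [hi_size] num_hi ++ PySem.List.pyRepeat [lo_size] (num_pieces - num_hi)
  (chunk_lens.foldl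
    (fun (st : List (Int × Int) × Int) chunk_len =>
      (st.1 ++ [(st.2, st.2 + chunk_len)], st.2 + chunk_len))
    ([], 0)).1

-- ===== PORT B =====
def get_chunk_idxs_py_alt (seq_len : Int) (max_len : Int) : List (Int × Int) :=
  let num_pieces := PySem.Int.floordiv (seq_len + max_len - 1) max_len
  let lo_size := PySem.Int.floordiv seq_len num_pieces
  let num_hi := PySem.Int.mod seq_len num_pieces
  (PySem.List.pyRange 0 num_pieces 1).map (fun i =>
    (i * lo_size + min i num_hi, (i + 1) * lo_size + min (i + 1) num_hi))

-- ===== PRECONDITION & SPEC =====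
-- Pre_ excludes exactly the inputs where A raises ZeroDivisionError: max_len == 0, or
-- num_pieces == (seq_len + max_len - 1) // max_len == 0 (e.g. seq_len == 0 with max_len > 0).
def Pre_get_chunk_idxs_py (seq_len : Int) (max_len : Int) : Prop :=
  max_len ≠ 0 ∧ PySem.Int.floordiv (seq_len + max_len - 1) max_len ≠ 0
instance (seq_len : Int) (max_len : Int) : Decidable (Pre_get_chunk_idxs_py seq_len max_len) := by unfold Pre_get_chunk_idxs_py; infer_instance
def pvWitness_get_chunk_idxs_py : Int × Int := (10, 3)

def Spec_get_chunk_idxs_py (seq_len : Int) (max_len : Int) (out : List (Int × Int)) : Prop := out = get_chunk_idxs_py_alt seq_len max_len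
instance (seq_len : Int) (max_len : Int) (out : List (Int × Int)) : Decidable (Spec_get_chunk_idxs_py seq_len max_len out) := by unfold Spec_get_chunk_idxs_py; infer_instance

-- ===== CLAIM (what is proved, stated in full; the proofs are below) =====
def Claim_equal_get_chunk_idxs_py : Prop := ∀ (seq_len : Int) (max_len : Int), Dom_get_chunk_idxs_py seq_len max_len → Pre_get_chunk_idxs_py seq_len max_len → Spec_get_chunk_idxs_py seq_len max_len (get_chunk_idxs_py seq_len max_len)

-- ===== LEMMAS AND PROOFS =====

-- prefix sum of the first i chunk lengths
def pvPsum (cs : List Int) (i : Nat) : Int := (cs.take i).sum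

-- characterisation of A's accumulator loop: it emits the prefix-sum boundary pairs
theorem pvFoldl_chunks (cs : List Int) (acc : List (Int × Int)) (c : Int) :
    (cs.foldl
      (fun (st : List (Int × Int) × Int) chunk_len =>
        (st.1 ++ [(st.2, st.2 + chunk_len)], st.2 + chunk_len))
      (acc, c))
    = (acc ++ (List.range cs.length).map (fun i => (c + pvPsum cs i, c + pvPsum cs (i + 1))),
       c + pvPsum cs cs.length) := by
  induction cs generalizing acc c with
  | nil => simp [pvPsum]
  | cons x cs ih =>
    simp only [List.foldl_cons]
    rw [ih]
    simp only [Prod.mk.injEq]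
    refine ⟨?_, ?_⟩
    · rw [List.length_cons, List.range_succ_eq_map]
      simp only [List.map_cons, List.map_map]
      rw [List.append_assoc, List.singleton_append]
      refine congrArg (acc ++ ·) ?_
      refine List.cons_eq_cons.mpr ⟨by simp [pvPsum], ?_⟩
      apply List.map_congr_left
      intro a _
      simp only [Function.comp, pvPsum, List.take_succ_cons, List.sum_cons,
        Nat.succ_eq_add_one, Prod.mk.injEq]
      exact ⟨by ring, by ring⟩
    · simp [pvPsum, List.take_succ_cons, add_assoc, add_comm, add_left_comm]

-- prefix sums of the hi/lo chunk-length list are the closed form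
theorem pvPsum_chunk (L : Int) (h n i : Nat) (hi : i ≤ n) :
    pvPsum (List.replicate h (L + 1) ++ List.replicate (n - h) L) i
    = (i : Int) * L + min (i : Int) (h : Int) := by
  unfold pvPsum
  rw [List.take_append]
  rw [List.take_replicate, List.take_replicate]
  rw [List.sum_append, List.sum_replicate, List.sum_replicate]
  rw [List.length_replicate]
  have h2 : (min (i - h) (n - h) : Nat) = i - min i h := by omega
  have h3 : ((min i h : Nat) : Int) = min (i : Int) (h : Int) := by omega
  simp only [nsmul_eq_mul]
  rw [h2]
  have h4 : ((i - min i h : Nat) : Int) = (i : Int) - min (i : Int) (h : Int) := by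
    omega
  rw [h4, h3]
  ring

theorem get_chunk_idxs_eq (seq_len max_len : Int)
    (hpre : Pre_get_chunk_idxs_py seq_len max_len) :
    get_chunk_idxs_py seq_len max_len = get_chunk_idxs_py_alt seq_len max_len := by
  obtain ⟨hm, hp⟩ := hpre
  simp only [get_chunk_idxs_py, get_chunk_idxs_py_alt]
  set P := PySem.Int.floordiv (seq_len + max_len - 1) max_len with hP
  set L := PySem.Int.floordiv seq_len P with hL
  set H := PySem.Int.mod seq_len P with hH
  rcases lt_or_gt_of_ne hp with hneg | hpos
  · -- num_pieces < 0: both sides empty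
    have hb := PySem.Int.mod_neg_bounds (a := seq_len) (b := P) hneg
    have e1 : PySem.List.pyRepeat [L + 1] H = [] := by
      rw [PySem.List.pyRepeat_singleton]
      have : H.toNat = 0 := by omega
      simp [this]
    have e2 : PySem.List.pyRepeat [L] (P - H) = [] := by
      rw [PySem.List.pyRepeat_singleton]
      have : (P - H).toNat = 0 := by omega
      simp [this]
    rw [e1, e2, PySem.List.pyRange_one_eq_nil (by omega)]
    simp
  · -- num_pieces > 0
    have h0 : 0 ≤ H := PySem.Int.mod_nonneg (a := seq_len) hpos
    have h1 : H < P := PySem.Int.mod_lt (a := seq_len) hpos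
    set n : Nat := P.toNat with hn
    set hh : Nat := H.toNat with hhh
    have hHc : (hh : Int) = H := Int.toNat_of_nonneg h0
    have hPc : (n : Int) = P := Int.toNat_of_nonneg (le_of_lt hpos)
    have hhn : hh ≤ n := by omega
    have e1 : PySem.List.pyRepeat [L + 1] H = List.replicate hh (L + 1) := by
      rw [PySem.List.pyRepeat_singleton]
    have e2 : PySem.List.pyRepeat [L] (P - H) = List.replicate (n - hh) L := by
      rw [PySem.List.pyRepeat_singleton]
      congr 1
      omega
    rw [e1, e2]
    rw [pvFoldl_chunks]
    rw [PySem.List.pyRange_one]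
    simp only [sub_zero, hPc.symm, Int.toNat_natCast]
    rw [List.nil_append, List.map_map]
    have hlen : (List.replicate hh (L + 1) ++ List.replicate (n - hh) L).length = n := by
      simp; omega
    rw [hlen]
    apply List.map_congr_left
    intro i hi
    rw [List.mem_range] at hi
    have c1 := pvPsum_chunk L hh n i (by omega)
    have c2 := pvPsum_chunk L hh n (i + 1) (by omega)
    simp only [Function.comp]
    rw [c1, c2]
    push_cast
    rw [hHc]
    simp only [zero_add]

-- ===== VERDICT (by name: the statement is the Claim_ definition above) =====
theorem get_chunk_idxs_py_spec : Claim_equal_get_chunk_idxs_py := by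
  intro s m _ hpre
  unfold Spec_get_chunk_idxs_py
  exact get_chunk_idxs_eq s m hpre
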